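-- pv_equiv track=rewrite | github.com/eBetcel/daily-byte-codes | vacuum_cleaner_route/vacuum_cleaner_route.py | vacuum_cleaner_route
-- ===== SOURCE A (Python) =====
-- def vacuum_cleaner_route(movements_string):
--     """
--     Given a sequence of movements, returns if a robot goes to the same spot
--
--     Args:
--         movements_string (str): The string of movements
--
--     Returns:
--         bool: The result of the verification
--
--     Example:
--         >>> vacuum_cleaner_rout("UD")
--         True
--     """
--
--     robot_position = (0, 0)
--     for move in movements_string:
--         match move:
--             case "U":
--                 robot_position = (robot_position[0], robot_position[1] + 1)
--             case "D":
--                 robot_position = (robot_position[0], robot_position[1] - 1)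
--             case "R":
--                 robot_position = (robot_position[0] + 1, robot_position[1])
--             case "L":
--                 robot_position = (robot_position[0] - 1, robot_position[1])
--
--     return robot_position == (0, 0)
-- ===== SOURCE B (Python) =====
-- def vacuum_cleaner_route(movements_string):
--     return (movements_string.count("U") == movements_string.count("D")
--             and movements_string.count("L") == movements_string.count("R"))
-- ===== Notes on version B (the rewrite author's own statement) =====
-- stated objective: simpler
-- what changed: Replaces the stateful per-character position loop with four substring counts compared pairwise (vertical and horizontal tallies).
import Mathlib
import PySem

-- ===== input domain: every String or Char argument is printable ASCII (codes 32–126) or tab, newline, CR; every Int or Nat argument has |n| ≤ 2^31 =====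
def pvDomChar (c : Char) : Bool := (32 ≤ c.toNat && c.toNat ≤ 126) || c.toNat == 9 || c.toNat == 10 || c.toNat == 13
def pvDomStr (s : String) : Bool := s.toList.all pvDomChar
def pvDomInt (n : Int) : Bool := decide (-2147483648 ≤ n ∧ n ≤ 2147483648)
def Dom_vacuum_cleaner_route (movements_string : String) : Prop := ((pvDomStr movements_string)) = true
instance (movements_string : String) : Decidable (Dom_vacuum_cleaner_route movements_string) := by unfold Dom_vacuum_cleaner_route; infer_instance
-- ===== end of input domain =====

-- B replaces A's stateful per-character position loop with four substring counts compared pairwise (objective: simpler).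


-- ===== PORT A =====
def vacuum_cleaner_route (movements_string : String) : Bool :=
  let robot_position : Int × Int :=
    movements_string.toList.foldl
      (fun (p : Int × Int) move =>
        if move = 'U' then (p.1, p.2 + 1)
        else if move = 'D' then (p.1, p.2 - 1)
        else if move = 'R' then (p.1 + 1, p.2)
        else if move = 'L' then (p.1 - 1, p.2)
        else p)
      (0, 0)
  decide (robot_position = (0, 0))

-- ===== PORT B =====
def vacuum_cleaner_route_alt (movements_string : String) : Bool :=
  (PySem.Str.count movements_string "U" == PySem.Str.count movements_string "D")
    && (PySem.Str.count movements_string "L" == PySem.Str.count movements_string "R")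

-- ===== PRECONDITION & SPEC =====
def Spec_vacuum_cleaner_route (movements_string : String) (out : Bool) : Prop := out = vacuum_cleaner_route_alt movements_string
instance (movements_string : String) (out : Bool) : Decidable (Spec_vacuum_cleaner_route movements_string out) := by unfold Spec_vacuum_cleaner_route; infer_instance

-- ===== CLAIM (what is proved, stated in full; the proofs are below) =====
def Claim_equal_vacuum_cleaner_route : Prop := ∀ (movements_string : String), Dom_vacuum_cleaner_route movements_string → Spec_vacuum_cleaner_route movements_string (vacuum_cleaner_route movements_string)

-- ===== LEMMAS AND PROOFS =====

-- Python's str.count for a one-character pattern is List.count on the code points.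
theorem count_go_singleton (c : Char) (s : List Char) (fuel acc : Nat)
    (h : s.length ≤ fuel) :
    PySem.Chars.count.go [c] fuel s acc = acc + s.count c := by
  induction fuel generalizing s acc with
  | zero =>
    have : s = [] := List.length_eq_zero_iff.mp (Nat.le_zero.mp h)
    subst this; simp [PySem.Chars.count.go]
  | succ n ih =>
    cases s with
    | nil => simp [PySem.Chars.count.go]
    | cons x t =>
      simp only [PySem.Chars.count.go]
      by_cases hx : x = c
      · subst hx
        have hp : List.isPrefixOf [x] (x :: t) = true := by
          simp [List.isPrefixOf]
        rw [if_pos hp]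
        simp only [List.length_cons, List.length_nil, List.drop_succ_cons, List.drop_zero]
        rw [ih t (acc + 1) (by simpa using Nat.lt_succ_iff.mp (by simpa using h))]
        simp
        omega
      · have hp : List.isPrefixOf [c] (x :: t) = false := by
          simp [List.isPrefixOf]
          exact fun hh => absurd hh.symm hx
        rw [if_neg (by simp [hp])]
        rw [ih t acc (by simpa using Nat.lt_succ_iff.mp (by simpa using h))]
        simp [hx]

theorem count_singleton (s : List Char) (c : Char) :
    PySem.Chars.count s [c] = s.count c := by
  simp only [PySem.Chars.count, List.isEmpty_cons, Bool.false_eq_true, if_false]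
  simpa using count_go_singleton c s s.length 0 le_rfl

-- A's fold from any start position adds (R-count − L-count, U-count − D-count).
theorem foldl_pos (l : List Char) (p : Int × Int) :
    l.foldl
      (fun (p : Int × Int) move =>
        if move = 'U' then (p.1, p.2 + 1)
        else if move = 'D' then (p.1, p.2 - 1)
        else if move = 'R' then (p.1 + 1, p.2)
        else if move = 'L' then (p.1 - 1, p.2)
        else p) p
    = (p.1 + (l.count 'R' : Int) - (l.count 'L' : Int),
       p.2 + (l.count 'U' : Int) - (l.count 'D' : Int)) := by
  induction l generalizing p with
  | nil => simp
  | cons x t ih =>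
    simp only [List.foldl_cons, ih, List.count_cons]
    by_cases hU : x = 'U' <;> by_cases hD : x = 'D' <;> by_cases hR : x = 'R' <;>
      by_cases hL : x = 'L' <;> simp_all <;> omega

-- ===== VERDICT (by name: the statement is the Claim_ definition above) =====
theorem vacuum_cleaner_route_spec : Claim_equal_vacuum_cleaner_route := by
  intro s _
  unfold Spec_vacuum_cleaner_route vacuum_cleaner_route vacuum_cleaner_route_alt
  have hU : "U".toList = ['U'] := rfl
  have hD : "D".toList = ['D'] := rfl
  have hL : "L".toList = ['L'] := rfl
  have hR : "R".toList = ['R'] := rfl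
  simp only [PySem.Str.count_eq, hU, hD, hL, hR, count_singleton, foldl_pos]
  rw [Bool.eq_iff_iff]
  simp only [decide_eq_true_eq, Bool.and_eq_true, beq_iff_eq, Prod.mk.injEq]
  omega
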